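-- pv_equiv track=rewrite | github.com/gustibagusbayu/PSO-LVQ-Hybrid | skripsi/codeApp/lvqPso/views.py | costData
-- ===== SOURCE A (Python) =====
-- import math
--
-- def costData(row_data, row_particle, data, particle, label):
--     sqrt_value = []
--     # rumus menghitung jarak minimal
--     for i in range(row_particle):
--         temp = []
--         for j in range(row_data):
--             calculate0, calculate1 = 0, 0
--             # untuk kelas 0 (index partikel 1 - 13)
--             for k in range(0, 11):
--                 calculate0 += pow(data[j][k]-particle[i][k], 2)
--             # untuk kelas 1 (index partikel 14 - 26)
--             for k in range(11, 22):
--                 calculate1 += pow(data[j][k-11]-particle[i][k], 2)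
--             temp.append([math.sqrt(calculate0), math.sqrt(calculate1)])
--         sqrt_value.append(temp)
--     cost_value = []
--     mins_value = []
--     mins = 0
--     # menyimpan jarak kelas minimal kelas 0/1
--     for i in range(row_particle):
--         minDistance = []
--         for j in range(row_data):
--             if(sqrt_value[i][j][0] <= sqrt_value[i][j][1]):
--                 mins = 0
--             else:
--                 mins = 1
--             minDistance.append(mins)
--         mins_value.append(minDistance)
--     # check perbedaan hasil jarak minimal(cost) dengan target data(kelas sebenarnya)
--     for i in range(row_particle):
--         cost, value = 0, 0
--         for j in range(row_data):
--             if mins_value[i][j] == label[j]: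
--                 value = 0
--             else:
--                 value = 1
--             cost += value
--         cost_value.append(cost)
--     return cost_value
-- ===== SOURCE B (Python) =====
-- def costData(row_data, row_particle, data, particle, label):
--     # Single fused pass: classify each (particle, row) pair by comparing the two
--     # squared-distance sums directly (sqrt is monotone, so no sqrt needed) and
--     # accumulate the mismatch count per particle; no intermediate tables.
--     def _classify(drow, prow):
--         c0 = sum((drow[k] - prow[k]) ** 2 for k in range(11))
--         c1 = sum((drow[k] - prow[k + 11]) ** 2 for k in range(11))
--         return 0 if c0 <= c1 else 1
--     return [sum(1 for j in range(row_data)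
--                 if _classify(data[j], particle[i]) != label[j])
--             for i in range(row_particle)]
-- ===== Notes on version B (the rewrite author's own statement) =====
-- stated objective: simpler
-- what changed: Collapses A's three grid passes and its sqrt_value/mins_value tables into one fused pass that classifies each (particle,row) pair by comparing the exact squared-distance sums (no math.sqrt, sqrt being monotone) and directly accumulates each particle's mismatch count.
import Mathlib
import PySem

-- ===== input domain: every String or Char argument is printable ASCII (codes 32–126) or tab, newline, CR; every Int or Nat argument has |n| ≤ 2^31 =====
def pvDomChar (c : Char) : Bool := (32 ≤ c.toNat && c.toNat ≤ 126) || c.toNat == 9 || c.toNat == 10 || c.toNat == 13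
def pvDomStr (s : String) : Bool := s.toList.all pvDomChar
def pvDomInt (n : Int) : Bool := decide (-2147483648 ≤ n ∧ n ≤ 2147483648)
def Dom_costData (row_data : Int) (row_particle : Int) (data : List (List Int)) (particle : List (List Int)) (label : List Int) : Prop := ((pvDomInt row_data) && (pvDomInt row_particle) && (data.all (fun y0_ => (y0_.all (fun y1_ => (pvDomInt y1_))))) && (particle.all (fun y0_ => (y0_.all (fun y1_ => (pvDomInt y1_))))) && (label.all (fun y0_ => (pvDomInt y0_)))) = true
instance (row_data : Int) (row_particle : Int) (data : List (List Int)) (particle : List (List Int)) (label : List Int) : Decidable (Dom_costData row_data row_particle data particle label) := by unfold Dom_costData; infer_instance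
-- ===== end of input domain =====

-- B replaces A's three grid passes and its sqrt_value/mins_value tables by one fused pass that
-- classifies each pair by comparing the exact squared-distance sums (sqrt dropped: it is monotone)
-- and accumulates each particle's mismatch count directly; objective: simpler.

-- ===== PORT A =====
-- math.sqrt(c0) <= math.sqrt(c1) on floats is ported as c0 <= c1 on the exact integer radicands:
-- under Pre_ (accessed entries bounded by 2^22) both radicands are < 2^50, are exact as floats, and
-- correctly-rounded sqrt of distinct such integers yields distinct floats, so the comparison is exact there.
def costData (row_data : Int) (row_particle : Int) (data : List (List Int)) (particle : List (List Int)) (label : List Int) : List Int :=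
  let sqrt_value := (PySem.List.pyRange 0 row_particle 1).map (fun i =>
    (PySem.List.pyRange 0 row_data 1).map (fun j =>
      let calculate0 := (PySem.List.pyRange 0 11 1).foldl (fun acc k =>
        acc + (PySem.List.pyGetD (PySem.List.pyGetD data j []) k 0
               - PySem.List.pyGetD (PySem.List.pyGetD particle i []) k 0) ^ 2) 0
      let calculate1 := (PySem.List.pyRange 11 22 1).foldl (fun acc k =>
        acc + (PySem.List.pyGetD (PySem.List.pyGetD data j []) (k - 11) 0
               - PySem.List.pyGetD (PySem.List.pyGetD particle i []) k 0) ^ 2) 0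
      (calculate0, calculate1)))
  let mins_value := (PySem.List.pyRange 0 row_particle 1).map (fun i =>
    (PySem.List.pyRange 0 row_data 1).map (fun j =>
      let p := PySem.List.pyGetD (PySem.List.pyGetD sqrt_value i []) j ((0 : Int), (0 : Int))
      if p.1 ≤ p.2 then (0 : Int) else 1))
  let cost_value := (PySem.List.pyRange 0 row_particle 1).map (fun i =>
    (PySem.List.pyRange 0 row_data 1).foldl (fun cost j =>
      cost + (if PySem.List.pyGetD (PySem.List.pyGetD mins_value i []) j 0
                 = PySem.List.pyGetD label j 0 then (0 : Int) else 1)) 0)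
  cost_value

-- ===== PORT B =====
def pvClassify (drow prow : List Int) : Int :=
  let c0 := (List.range 11).foldl (fun acc k =>
    acc + (PySem.List.pyGetD drow (k : Int) 0 - PySem.List.pyGetD prow (k : Int) 0) ^ 2) 0
  let c1 := (List.range 11).foldl (fun acc k =>
    acc + (PySem.List.pyGetD drow (k : Int) 0 - PySem.List.pyGetD prow ((k : Int) + 11) 0) ^ 2) 0
  if c0 ≤ c1 then 0 else 1

def costData_alt (row_data : Int) (row_particle : Int) (data : List (List Int)) (particle : List (List Int)) (label : List Int) : List Int :=
  (PySem.List.pyRange 0 row_particle 1).map (fun i =>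
    (PySem.List.pyRange 0 row_data 1).foldl (fun cost j =>
      cost + (if pvClassify (PySem.List.pyGetD data j []) (PySem.List.pyGetD particle i [])
                 ≠ PySem.List.pyGetD label j 0 then (1 : Int) else 0)) 0)

-- ===== PRECONDITION & SPEC =====
-- Pre_ excludes the inputs where A's indexing raises IndexError (too few rows, data rows shorter
-- than 11, particle rows shorter than 22, label shorter than row_data) and inputs with an accessed
-- entry of magnitude above 2^22, where A's float math.sqrt comparison and the exact squared-distance
-- comparison are both defensible nearest-class choices and may disagree by rounding.
def Pre_costData (row_data : Int) (row_particle : Int) (data : List (List Int)) (particle : List (List Int)) (label : List Int) : Prop :=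
  0 < row_data → 0 < row_particle →
    (row_data ≤ (data.length : Int) ∧ row_data ≤ (label.length : Int) ∧
     row_particle ≤ (particle.length : Int) ∧
     (∀ row ∈ data.take row_data.toNat, 11 ≤ row.length ∧ ∀ x ∈ row.take 11, x.natAbs ≤ 4194304) ∧
     (∀ row ∈ particle.take row_particle.toNat, 22 ≤ row.length ∧ ∀ x ∈ row.take 22, x.natAbs ≤ 4194304))
instance (row_data : Int) (row_particle : Int) (data : List (List Int)) (particle : List (List Int)) (label : List Int) : Decidable (Pre_costData row_data row_particle data particle label) := by unfold Pre_costData; infer_instance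

def pvWitness_costData : Int × Int × List (List Int) × List (List Int) × List Int :=
  (1, 1, [[0,0,0,0,0,0,0,0,0,0,0]], [[1,0,0,0,0,0,0,0,0,0,0,0,0,0,0,0,0,0,0,0,0,0]], [1])

def Spec_costData (row_data : Int) (row_particle : Int) (data : List (List Int)) (particle : List (List Int)) (label : List Int) (out : List Int) : Prop := out = costData_alt row_data row_particle data particle label
instance (row_data : Int) (row_particle : Int) (data : List (List Int)) (particle : List (List Int)) (label : List Int) (out : List Int) : Decidable (Spec_costData row_data row_particle data particle label out) := by unfold Spec_costData; infer_instance

-- ===== CLAIM (what is proved, stated in full; the proofs are below) =====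
def Claim_equal_costData : Prop := ∀ (row_data : Int) (row_particle : Int) (data : List (List Int)) (particle : List (List Int)) (label : List Int), Dom_costData row_data row_particle data particle label → Pre_costData row_data row_particle data particle label → Spec_costData row_data row_particle data particle label (costData row_data row_particle data particle label)

-- ===== LEMMAS AND PROOFS =====

theorem costData_eq_alt (row_data row_particle : Int) (data particle : List (List Int)) (label : List Int) :
    costData row_data row_particle data particle label
      = costData_alt row_data row_particle data particle label := by
  unfold costData costData_alt
  apply List.map_congr_left
  intro i hi
  apply PySem.List.foldl_congr_mem
  intro cost j hj
  rw [PySem.List.mem_pyRange_one] at hi hj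
  rw [PySem.List.pyGetD_map_pyRange_of_nonneg _ _ _ _ hi.1 hi.2,
      PySem.List.pyGetD_map_pyRange_of_nonneg _ _ _ _ hj.1 hj.2,
      PySem.List.pyGetD_map_pyRange_of_nonneg _ _ _ _ hi.1 hi.2,
      PySem.List.pyGetD_map_pyRange_of_nonneg _ _ _ _ hj.1 hj.2]
  simp only [pvClassify]
  have hr0 : PySem.List.pyRange 0 11 1 = [0,1,2,3,4,5,6,7,8,9,10] := by decide
  have hr1 : PySem.List.pyRange 11 22 1 = [11,12,13,14,15,16,17,18,19,20,21] := by decide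
  have hr2 : List.range 11 = [0,1,2,3,4,5,6,7,8,9,10] := by decide
  simp only [hr0, hr1, hr2]
  norm_num [List.foldl, List.map]

-- ===== VERDICT (by name: the statement is the Claim_ definition above) =====
theorem costData_spec : Claim_equal_costData := by
  intro row_data row_particle data particle label _ _
  unfold Spec_costData
  exact costData_eq_alt row_data row_particle data particle label
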